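-- pv_equiv track=rewrite | github.com/anuragGUPTA2235/Programming-LANG | PYTHON/Accenture/max_elementandits_index.py | max_returner
-- ===== SOURCE A (Python) =====
-- def max_returner(arr):
--     max = arr[0]
--     hashmap = {}
--     for index,val in enumerate(arr):
--         hashmap[val] = index
--
--     for items in range(len(arr)):
--         if arr[items] > max:
--             max = arr[items]
--
--     return max,hashmap[max]
-- ===== SOURCE B (Python) =====
-- def max_returner(arr):
--     best = arr[0]
--     idx = 0
--     for i, val in enumerate(arr):
--         if val >= best:
--             best = val
--             idx = i
--     return best, idx
-- ===== Notes on version B (the rewrite author's own statement) =====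
-- stated objective: simpler
-- what changed: Replaced the dict-of-all-indices plus a second max-scan with a single pass keeping only the running max and the index of its latest occurrence (>= update reproduces the last-occurrence tie-break).
import Mathlib
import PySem

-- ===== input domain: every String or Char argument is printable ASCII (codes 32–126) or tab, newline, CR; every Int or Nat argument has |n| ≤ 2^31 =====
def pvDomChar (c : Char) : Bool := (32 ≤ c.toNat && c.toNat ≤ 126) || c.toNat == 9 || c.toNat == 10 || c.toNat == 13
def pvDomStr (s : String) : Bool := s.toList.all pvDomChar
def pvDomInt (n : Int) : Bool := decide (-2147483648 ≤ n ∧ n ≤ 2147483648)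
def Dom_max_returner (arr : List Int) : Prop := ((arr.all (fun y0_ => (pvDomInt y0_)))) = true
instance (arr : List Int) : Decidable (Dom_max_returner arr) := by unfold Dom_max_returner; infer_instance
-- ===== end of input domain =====

-- B replaces A's full index-dict plus second max-scan by a single pass keeping the running max
-- and the index of its latest occurrence (objective: simpler).


-- ===== PORT A =====
def max_returner (arr : List Int) : Int × Int :=
  match arr with
  | [] => (0, 0)  -- Python raises IndexError reading the first element here; excluded by Pre_
  | a0 :: _ =>
    -- hashmap = {}; for index,val in enumerate(arr): hashmap[val] = index
    let hashmap : PySem.Dict Int Int :=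
      (PySem.List.enumerate arr 0).foldl (fun d p => d.insert p.2 p.1) PySem.Dict.empty
    -- for items in range(len(arr)): if arr[items] > max: max = arr[items]
    let m :=
      (PySem.List.pyRange 0 (arr.length : Int) 1).foldl
        (fun m i => if m < PySem.List.pyGetD arr i 0 then PySem.List.pyGetD arr i 0 else m) a0
    (m, hashmap.getD m 0)

-- ===== PORT B =====
def max_returner_alt (arr : List Int) : Int × Int :=
  match arr with
  | [] => (0, 0)  -- Python raises IndexError reading the first element here; excluded by Pre_
  | a0 :: _ =>
    -- best = arr[0]; idx = 0; for i,val in enumerate(arr): if val >= best: best, idx = val, i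
    (PySem.List.enumerate arr 0).foldl
      (fun s p => if s.1 ≤ p.2 then (p.2, p.1) else s) (a0, 0)

-- ===== PRECONDITION & SPEC =====
-- Pre_ excludes only the empty list, on which Python A (and B) raise IndexError reading the first element.
def Pre_max_returner (arr : List Int) : Prop := arr ≠ []
instance (arr : List Int) : Decidable (Pre_max_returner arr) := by unfold Pre_max_returner; infer_instance
def pvWitness_max_returner : List Int := ([3, 1, 3])
def Spec_max_returner (arr : List Int) (out : Int × Int) : Prop := out = max_returner_alt arr
instance (arr : List Int) (out : Int × Int) : Decidable (Spec_max_returner arr out) := by unfold Spec_max_returner; infer_instance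

-- ===== CLAIM (what is proved, stated in full; the proofs are below) =====
def Claim_equal_max_returner : Prop := ∀ (arr : List Int), Dom_max_returner arr → Pre_max_returner arr → Spec_max_returner arr (max_returner arr)

-- ===== LEMMAS AND PROOFS =====

lemma pv_enum_append (v : Int) : ∀ (l : List Int) (s : Int),
    PySem.List.enumerate (l ++ [v]) s
      = PySem.List.enumerate l s ++ [(s + (l.length : Int), v)] := by
  intro l
  induction l with
  | nil => intro s; simp [PySem.List.enumerate_cons, PySem.List.enumerate_nil]
  | cons x t ih =>
    intro s
    simp only [List.cons_append, PySem.List.enumerate_cons, ih, List.length_cons]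
    push_cast
    ring_nf

-- B's one pass computes exactly (max, last index of max achieved by A's dict lookup).
lemma pv_main (a0 : Int) : ∀ (l : List Int),
    (PySem.List.enumerate (a0 :: l) 0).foldl
        (fun s p => if s.1 ≤ p.2 then (p.2, p.1) else s) (a0, 0)
      = (l.foldl (fun m v => if m < v then v else m) a0,
         ((PySem.List.enumerate (a0 :: l) 0).foldl (fun d p => d.insert p.2 p.1)
             (PySem.Dict.empty : PySem.Dict Int Int)).getD
           (l.foldl (fun m v => if m < v then v else m) a0) 0) := by
  intro l
  induction l using List.reverseRecOn with
  | nil =>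
    simp [PySem.List.enumerate_cons, PySem.List.enumerate_nil,
      PySem.Dict.getD_insert_self]
  | append_singleton t v ih =>
    have hcons : a0 :: (t ++ [v]) = (a0 :: t) ++ [v] := by simp
    rw [hcons, pv_enum_append, List.foldl_append, List.foldl_append, List.foldl_append, ih]
    set M := t.foldl (fun m v => if m < v then v else m) a0 with hM
    set D := ((PySem.List.enumerate (a0 :: t) 0).foldl (fun d p => d.insert p.2 p.1)
        (PySem.Dict.empty : PySem.Dict Int Int)) with hD
    simp only [List.foldl_cons, List.foldl_nil]
    by_cases h : M ≤ v
    · rw [if_pos h]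
      rcases lt_or_eq_of_le h with hlt | heq
      · rw [if_pos hlt, PySem.Dict.getD_insert_self]
      · rw [if_neg (by omega), ← heq, PySem.Dict.getD_insert_self]
    · rw [if_neg h, if_neg (by omega), PySem.Dict.getD_insert_of_ne _ _ _ (by omega)]

lemma pv_head_step (a0 : Int) (l : List Int) :
    (a0 :: l).foldl (fun m v => if m < v then v else m) a0
      = l.foldl (fun m v => if m < v then v else m) a0 := by
  simp

-- ===== VERDICT (by name: the statement is the Claim_ definition above) =====
theorem max_returner_spec : Claim_equal_max_returner := by
  intro arr _ hpre
  match arr with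
  | [] => exact absurd rfl hpre
  | a0 :: rest =>
    show max_returner (a0 :: rest) = max_returner_alt (a0 :: rest)
    unfold max_returner max_returner_alt
    dsimp only
    rw [PySem.List.foldl_pyRange_zero_pyGetD' (a0 :: rest) 0
        (fun m v => if m < v then v else m) a0]
    rw [pv_head_step, pv_main a0 rest]
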